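-- pv_equiv track=rewrite | github.com/fabian20ro/generator-rebus | tests/test_batch_publish.py | _count_two_letter_slots
-- ===== SOURCE A (Python) =====
-- def _count_two_letter_slots(grid: list[list[bool]]) -> int:
--     rows, cols = len(grid), len(grid[0])
--     count = 0
--     for r in range(rows):
--         run = 0
--         for c in range(cols + 1):
--             if c < cols and grid[r][c]:
--                 run += 1
--             else:
--                 if run == 2:
--                     count += 1
--                 run = 0
--     for c in range(cols):
--         run = 0
--         for r in range(rows + 1):
--             if r < rows and grid[r][c]:
--                 run += 1
--             else:
--                 if run == 2:
--                     count += 1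
--                 run = 0
--     return count
-- ===== SOURCE B (Python) =====
-- def _count_two_letter_slots(grid: list[list[bool]]) -> int:
--     rows, cols = len(grid), len(grid[0])
--     total = 0
--     for r in range(rows):
--         for c in range(cols):
--             if (grid[r][c] and c + 1 < cols and grid[r][c + 1]
--                     and (c == 0 or not grid[r][c - 1])
--                     and (c + 2 >= cols or not grid[r][c + 2])):
--                 total += 1
--             if (grid[r][c] and r + 1 < rows and grid[r + 1][c]
--                     and (r == 0 or not grid[r - 1][c])
--                     and (r + 2 >= rows or not grid[r + 2][c])):
--                 total += 1
--     return total
-- ===== Notes on version B (the rewrite author's own statement) =====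
-- stated objective: alternative
-- what changed: Replaces the run-length accumulator sweeps (with a cols+1/rows+1 flush step) by a stateless local boundary-window test: each cell is counted iff it starts an exact-length-2 run horizontally or vertically, both directions handled in one nested pass.
import Mathlib
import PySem

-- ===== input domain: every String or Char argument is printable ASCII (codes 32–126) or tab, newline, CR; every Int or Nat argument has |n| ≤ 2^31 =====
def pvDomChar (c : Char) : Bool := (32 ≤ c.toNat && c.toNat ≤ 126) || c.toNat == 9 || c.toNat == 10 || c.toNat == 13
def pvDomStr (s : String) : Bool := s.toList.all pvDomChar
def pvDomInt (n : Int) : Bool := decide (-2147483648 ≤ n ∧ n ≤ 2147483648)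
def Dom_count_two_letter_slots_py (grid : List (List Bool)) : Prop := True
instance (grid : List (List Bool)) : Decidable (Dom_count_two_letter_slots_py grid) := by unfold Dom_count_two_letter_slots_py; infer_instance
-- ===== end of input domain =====

-- B changes the decomposition: A's stateful run-length sweeps become a stateless per-cell
-- boundary-window test ("this cell starts an exact-length-2 run"); equivalence is proved on
-- all grids on which A returns (nonempty, every row at least as long as the first).

-- ===== PORT A =====
-- grid[r][c]: Python indexing; Pre_ keeps every access in range, so the `.getD` defaults are never used.
def pvCell (grid : List (List Bool)) (r c : Int) : Bool :=
  (PySem.List.pyGet? ((PySem.List.pyGet? grid r).getD []) c).getD false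

def count_two_letter_slots_py (grid : List (List Bool)) : Int :=
  let rows : Int := grid.length
  let cols : Int := ((PySem.List.pyGet? grid 0).getD []).length
  let count1 : Int :=
    (PySem.List.pyRange 0 rows 1).foldl (fun count r =>
      ((PySem.List.pyRange 0 (cols + 1) 1).foldl (fun (s : Int × Int) c =>
        if c < cols ∧ pvCell grid r c then (s.1 + 1, s.2)
        else (0, if s.1 == 2 then s.2 + 1 else s.2)) (0, count)).2) 0
  (PySem.List.pyRange 0 cols 1).foldl (fun count c =>
    ((PySem.List.pyRange 0 (rows + 1) 1).foldl (fun (s : Int × Int) r =>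
      if r < rows ∧ pvCell grid r c then (s.1 + 1, s.2)
      else (0, if s.1 == 2 then s.2 + 1 else s.2)) (0, count)).2) count1

-- ===== PORT B =====
def count_two_letter_slots_py_alt (grid : List (List Bool)) : Int :=
  let rows : Int := grid.length
  let cols : Int := ((PySem.List.pyGet? grid 0).getD []).length
  (PySem.List.pyRange 0 rows 1).foldl (fun total r =>
    (PySem.List.pyRange 0 cols 1).foldl (fun total c =>
      let total :=
        if pvCell grid r c ∧ c + 1 < cols ∧ pvCell grid r (c + 1) ∧
            (c = 0 ∨ ¬ pvCell grid r (c - 1)) ∧ (cols ≤ c + 2 ∨ ¬ pvCell grid r (c + 2))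
        then total + 1 else total
      if pvCell grid r c ∧ r + 1 < rows ∧ pvCell grid (r + 1) c ∧
          (r = 0 ∨ ¬ pvCell grid (r - 1) c) ∧ (rows ≤ r + 2 ∨ ¬ pvCell grid (r + 2) c)
      then total + 1 else total) total) 0

-- ===== PRECONDITION & SPEC =====
-- Pre_ excludes exactly the inputs on which Python A raises IndexError: the empty grid
-- (grid[0] fails) and grids with a row shorter than the first row (grid[r][c] fails).
def Pre_count_two_letter_slots_py (grid : List (List Bool)) : Prop :=
  grid ≠ [] ∧ ∀ row ∈ grid, (grid.headD []).length ≤ row.length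
instance (grid : List (List Bool)) : Decidable (Pre_count_two_letter_slots_py grid) := by
  unfold Pre_count_two_letter_slots_py; infer_instance

def pvWitness_count_two_letter_slots_py : List (List Bool) :=
  [[true, true, false], [false, true, true], [true, false, true]]

def Spec_count_two_letter_slots_py (grid : List (List Bool)) (out : Int) : Prop := out = count_two_letter_slots_py_alt grid
instance (grid : List (List Bool)) (out : Int) : Decidable (Spec_count_two_letter_slots_py grid out) := by unfold Spec_count_two_letter_slots_py; infer_instance

-- ===== CLAIM (what is proved, stated in full; the proofs are below) =====
def Claim_equal_count_two_letter_slots_py : Prop := ∀ (grid : List (List Bool)), Dom_count_two_letter_slots_py grid → Pre_count_two_letter_slots_py grid → Spec_count_two_letter_slots_py grid (count_two_letter_slots_py grid)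

-- ===== LEMMAS AND PROOFS =====

def pvCntA : Int → List Bool → Int
  | run, [] => if run == 2 then 1 else 0
  | run, a :: t => if a then pvCntA (run + 1) t else (if run == 2 then 1 else 0) + pvCntA 0 t

def pvCntB : Bool → List Bool → Int
  | _, [] => 0
  | _, [_] => 0
  | prev, a :: b :: t => (if !prev && a && b && !(t.headD false) then 1 else 0) + pvCntB a (b :: t)

def pvLead (xs : List Bool) : Int := ((xs.takeWhile id).length : Int)

theorem pvLead_nonneg (xs : List Bool) : 0 ≤ pvLead xs := by simp [pvLead]

theorem pvLead_cons_true (t : List Bool) : pvLead (true :: t) = 1 + pvLead t := by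
  simp [pvLead]; omega

theorem pvLead_cons_false (t : List Bool) : pvLead (false :: t) = 0 := by
  simp [pvLead]

theorem pvLead_eq_zero_iff (t : List Bool) : pvLead t = 0 ↔ t.headD false = false := by
  cases t with
  | nil => simp [pvLead]
  | cons a t' =>
    cases a
    · simp [pvLead_cons_false]
    · have := pvLead_nonneg t'
      rw [pvLead_cons_true]
      simp; omega

theorem pvCntB_false_cons (prev : Bool) (t : List Bool) :
    pvCntB prev (false :: t) = pvCntB false t := by
  cases t with
  | nil => simp [pvCntB]
  | cons b t' => simp [pvCntB]

theorem pvCntB_true_cons (t : List Bool) : pvCntB true (true :: t) = pvCntB true t := by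
  cases t with
  | nil => simp [pvCntB]
  | cons b t' => simp [pvCntB]


theorem pvCntA_eq_cntB_gen : ∀ (xs : List Bool) (run : Int), 0 ≤ run →
    pvCntA run xs = pvCntB (decide (0 < run)) xs +
      (if 0 < run ∧ run + pvLead xs = 2 then 1 else 0) := by
  intro xs
  induction xs with
  | nil =>
    intro run _
    simp only [pvCntA, pvCntB, pvLead, List.takeWhile_nil, List.length_nil, Int.natCast_zero,
      beq_iff_eq]
    split_ifs <;> omega
  | cons a t ih =>
    intro run hrun
    cases a
    · -- a = false
      have h0 := ih 0 le_rfl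
      simp only [pvCntA, Bool.false_eq_true, if_false, pvCntB_false_cons, pvLead_cons_false,
        beq_iff_eq]
      rw [h0]
      simp only [lt_irrefl, decide_false]
      simp only [false_and, if_false, add_zero]
      generalize pvCntB false t = x
      split_ifs <;> omega
    · -- a = true
      have h1 := ih (run + 1) (by omega)
      simp only [pvCntA, if_true, pvLead_cons_true]
      rw [h1]
      have hd1 : decide (0 < run + 1) = true := by simp; omega
      rw [hd1]
      by_cases hr : 0 < run
      · have hd : decide (0 < run) = true := by simp [hr]
        rw [hd, pvCntB_true_cons]
        have : (0 < run + 1 ∧ run + 1 + pvLead t = 2) ↔ (0 < run ∧ run + (1 + pvLead t) = 2) := by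
          constructor <;> intro h <;> exact ⟨by omega, by omega⟩
        rw [if_congr this rfl rfl]
      · have hr0 : run = 0 := by omega
        subst hr0
        simp only [lt_irrefl, decide_false]
        have key : pvCntB false (true :: t) = pvCntB true t + (if pvLead t = 1 then 1 else 0) := by
          cases t with
          | nil => simp [pvCntB, pvLead]
          | cons b t' =>
            simp only [pvCntB, Bool.not_false, Bool.true_and]
            cases b
            · have := pvLead_nonneg t'
              rw [pvLead_cons_false]
              simp
            · rw [pvLead_cons_true]
              cases h : t'.headD false
              · have hz : pvLead t' = 0 := (pvLead_eq_zero_iff t').mpr h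
                rw [hz, if_pos (by omega : (1:Int) + 0 = 1)]
                simp
                ring
              · have hz : pvLead t' ≠ 0 := by
                  rw [Ne, pvLead_eq_zero_iff, h]; simp
                rw [if_neg (show ¬(1 + pvLead t' = 1) by omega)]
                simp
        rw [key]
        have h3 : (0 < (0:Int) + 1 ∧ 0 + 1 + pvLead t = 2) ↔ (pvLead t = 1) := by
          constructor
          · intro h; omega
          · intro h; exact ⟨by omega, by omega⟩
        rw [if_congr h3 rfl rfl]
        simp

theorem pvRange_self (a : Int) : PySem.List.pyRange a a = [] :=
  List.eq_nil_iff_forall_not_mem.mpr (fun x hx => by rw [PySem.List.mem_pyRange_one] at hx; omega)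

theorem pvFoldA (g : Int → Bool) : ∀ (xs : List Bool) (k n : Nat) (run count : Int),
    k + xs.length = n →
    (∀ j : Nat, j < xs.length → g ((k : Int) + j) = xs.getD j false) →
    ((PySem.List.pyRange (k : Int) ((n : Int) + 1) 1).foldl (fun (s : Int × Int) c =>
        if c < (n : Int) ∧ g c then (s.1 + 1, s.2)
        else (0, if s.1 == 2 then s.2 + 1 else s.2)) (run, count))
      = (0, count + pvCntA run xs) := by
  intro xs
  induction xs with
  | nil =>
    intro k n run count hlen _
    have hk : (k : Int) = (n : Int) := by simp at hlen; exact_mod_cast hlen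
    rw [hk, PySem.List.pyRange_one_cons (by omega), pvRange_self]
    simp only [List.foldl_cons, List.foldl_nil, lt_irrefl, false_and, if_false, pvCntA,
      beq_iff_eq]
    split_ifs <;> simp
  | cons a t ih =>
    intro k n run count hlen hacc
    have hkn : (k : Int) < (n : Int) := by simp at hlen; omega
    rw [PySem.List.pyRange_one_cons (by omega : (k:Int) < (n:Int)+1)]
    simp only [List.foldl_cons]
    have hg : g k = a := by
      have := hacc 0 (by simp)
      simpa using this
    have hacc' : ∀ j : Nat, j < t.length → g (((k+1 : Nat) : Int) + j) = t.getD j false := by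
      intro j hj
      have h2 := hacc (j+1) (by simp [hj])
      rw [List.getD_cons_succ] at h2
      have e : (k:Int) + ((j+1 : ℕ):Int) = ((k+1:ℕ):Int) + (j:Int) := by push_cast; ring
      rw [e] at h2; exact h2
    have hlen' : (k+1) + t.length = n := by simp at hlen ⊢; omega
    have hcast : ((k:Int) + 1) = ((k+1 : Nat) : Int) := by push_cast; ring
    cases a
    · rw [if_neg (by simp [hg])]
      rw [hcast, ih (k+1) n 0 (if run == 2 then count + 1 else count) hlen' hacc']
      simp only [pvCntA, if_false, beq_iff_eq, Bool.false_eq_true]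
      congr 1
      split_ifs <;> ring
    · rw [if_pos ⟨by omega, by simp [hg]⟩]
      rw [hcast, ih (k+1) n (run+1) count hlen' hacc']
      simp [pvCntA]


theorem pvFoldB (g : Int → Bool) : ∀ (xs : List Bool) (k n : Nat) (prev : Bool),
    k + xs.length = n →
    (∀ j : Nat, j < xs.length → g ((k : Int) + j) = xs.getD j false) →
    ((if k = 0 then false else g ((k : Int) - 1)) = prev) →
    ((PySem.List.pyRange (k : Int) (n : Int) 1).map (fun c =>
        if g c ∧ c + 1 < (n : Int) ∧ g (c + 1) ∧ (c = 0 ∨ ¬ g (c - 1)) ∧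
            ((n : Int) ≤ c + 2 ∨ ¬ g (c + 2))
        then (1 : Int) else 0)).sum = pvCntB prev xs := by
  intro xs
  induction xs with
  | nil =>
    intro k n prev hlen _ _
    have hk : (k : Int) = (n : Int) := by simp at hlen; exact_mod_cast hlen
    rw [hk, pvRange_self]
    simp [pvCntB]
  | cons a t ih =>
    intro k n prev hlen hacc hprev
    have hkn : (k : Int) < (n : Int) := by simp at hlen; omega
    rw [PySem.List.pyRange_one_cons hkn]
    simp only [List.map_cons, List.sum_cons]
    have hg : g k = a := by simpa using hacc 0 (by simp)
    have hacc' : ∀ j : Nat, j < t.length → g (((k+1 : Nat) : Int) + j) = t.getD j false := by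
      intro j hj
      have h2 := hacc (j+1) (by simp [hj])
      rw [List.getD_cons_succ] at h2
      have e : (k:Int) + ((j+1 : ℕ):Int) = ((k+1:ℕ):Int) + (j:Int) := by push_cast; ring
      rw [e] at h2; exact h2
    have hlen' : (k+1) + t.length = n := by simp at hlen ⊢; omega
    have hcast : ((k:Int) + 1) = ((k+1 : Nat) : Int) := by push_cast; ring
    have hprev' : (if k+1 = 0 then false else g (((k+1 : Nat):Int) - 1)) = a := by
      rw [if_neg (by omega)]
      rw [show ((k+1 : Nat):Int) - 1 = (k:Int) by push_cast; ring, hg]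
    have hrec := ih (k+1) n a hlen' hacc' hprev'
    rw [hcast, hrec]
    -- remaining: head indicator = pvCntB's head term difference
    cases t with
    | nil =>
      -- xs = [a]: n = k+1, indicator false since k+1 < n fails
      have hn : n = k + 1 := by simpa using hlen.symm
      rw [if_neg (by rw [hn]; push_cast; omega)]
      simp [pvCntB]
    | cons b t' =>
      have hgb : g (((k+1:ℕ)):Int) = b := by
        have := hacc 1 (by simp)
        rw [show ((k:Int) + ((1:ℕ):Int)) = ((k+1:ℕ):Int) by push_cast; ring] at this
        simpa using this
      have hn2 : (n:Int) = (k:Int) + 2 + t'.length := by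
        simp at hlen; omega
      have hprevhead : ((k:Int) = 0 ∨ ¬ g ((k:Int) - 1)) ↔ (prev = false) := by
        rcases Nat.eq_zero_or_pos k with hk0 | hkpos
        · subst hk0; simp at hprev; simp [hprev.symm]
        · rw [if_neg (by omega)] at hprev
          constructor
          · intro h
            rcases h with h | h
            · exfalso; omega
            · rw [← hprev]; simp [h]
          · intro h
            right
            rw [← hprev] at h; simp [h]
      have htail : ((n:Int) ≤ (k:Int) + 2 ∨ ¬ g ((k:Int) + 2)) ↔ (t'.headD false = false) := by
        cases t' with
        | nil =>
          simp only [List.headD_nil]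
          constructor
          · intro _; trivial
          · intro _; left; rw [hn2]; simp
        | cons c t'' =>
          have hgc : g ((k:Int) + 2) = c := by
            have := hacc 2 (by simp)
            rw [show ((k:Int) + (2:ℕ)) = (k:Int) + 2 by push_cast; ring] at this
            simpa using this
          simp only [List.headD_cons]
          constructor
          · intro h
            rcases h with h | h
            · exfalso; rw [hn2] at h; simp at h; omega
            · rw [hgc] at h; simpa using h
          · intro h
            right; rw [hgc]; simp [h]
      -- head indicator
      by_cases hcond : (!prev && a && b && !(t'.headD false)) = true
      · rw [if_pos ?_]
        · simp only [pvCntB]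
          rw [if_pos hcond]
        · have hca : a = true := by
            rcases Bool.and_eq_true_iff.mp hcond with ⟨h1, _⟩
            exact (Bool.and_eq_true_iff.mp (Bool.and_eq_true_iff.mp h1).1).2
          have hcp : prev = false := by
            rcases Bool.and_eq_true_iff.mp hcond with ⟨h1, _⟩
            have := (Bool.and_eq_true_iff.mp (Bool.and_eq_true_iff.mp h1).1).1
            simpa using this
          have hcb : b = true := (Bool.and_eq_true_iff.mp (Bool.and_eq_true_iff.mp hcond).1).2
          have hct : t'.headD false = false := by
            have := (Bool.and_eq_true_iff.mp hcond).2
            simpa using this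
          refine ⟨by rw [hg, hca], by rw [hn2]; push_cast; omega, by rw [hgb, hcb],
            hprevhead.mpr hcp, htail.mpr hct⟩
      · rw [if_neg ?_]
        · simp only [pvCntB]
          rw [if_neg hcond, zero_add]
        · intro hcon
          apply hcond
          rcases hcon with ⟨h1, h2, h3, h4, h5⟩
          have hp : prev = false := hprevhead.mp h4
          have ht : t'.headD false = false := htail.mp h5
          have ha : a = true := by rw [← hg]; exact h1
          have hb : b = true := by rw [← hgb]; exact h3
          rw [hp, ha, hb, ht]
          decide


theorem pvCntA_eq_cntB (xs : List Bool) : pvCntA 0 xs = pvCntB false xs := by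
  simpa using pvCntA_eq_cntB_gen xs 0 le_rfl

-- helper views of the grid used only by the proofs
def pvRow (grid : List (List Bool)) (i : Nat) : List Bool :=
  (grid.getD i []).take (grid.headD []).length

def pvCol (grid : List (List Bool)) (j : Nat) : List Bool :=
  grid.map (fun row => row.getD j false)

theorem pvCell_eq (grid : List (List Bool)) (i j : Nat) :
    pvCell grid (i : Int) (j : Int) = (grid.getD i []).getD j false := by
  simp [pvCell, PySem.List.pyGet?_natCast]

theorem pvCell_row (grid : List (List Bool)) (i j : Nat)
    (hj : j < (grid.headD []).length) :
    pvCell grid (i : Int) (j : Int) = (pvRow grid i).getD j false := by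
  rw [pvCell_eq, pvRow]
  have hj' : j < (grid.head?.getD []).length := by
    rw [← List.headD_eq_head?_getD]; exact hj
  simp [List.getD_eq_getElem?_getD, hj']

theorem pvCell_col (grid : List (List Bool)) (i j : Nat) (hi : i < grid.length) :
    pvCell grid (i : Int) (j : Int) = (pvCol grid j).getD i false := by
  rw [pvCell_eq, pvCol]
  simp [List.getD_eq_getElem?_getD, List.getElem?_eq_getElem hi]

theorem pvGetD_mem (grid : List (List Bool)) (i : Nat) (hi : i < grid.length) :
    grid.getD i [] ∈ grid := by
  rw [List.getD_eq_getElem?_getD, List.getElem?_eq_getElem hi]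
  exact List.getElem_mem hi

-- the two sequential conditional increments of B's inner loop as a sum of two indicators
theorem pvTwoIf (P Q : Prop) [Decidable P] [Decidable Q] (t : Int) :
    (let t' := if P then t + 1 else t
     if Q then t' + 1 else t') = t + ((if P then (1:Int) else 0) + (if Q then (1:Int) else 0)) := by
  dsimp only
  split_ifs <;> ring

theorem pvSumSwap {α β : Type} (l1 : List α) (l2 : List β) (f : α → β → Int) :
    (l1.map (fun a => (l2.map (f a)).sum)).sum
      = (l2.map (fun b => (l1.map (fun a => f a b)).sum)).sum := by
  induction l1 with
  | nil => simp
  | cons a t ih => simp [ih]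

-- cols in both ports is the length of the first row
theorem pvCols_eq (grid : List (List Bool)) (h : grid ≠ []) :
    ((PySem.List.pyGet? grid 0).getD []).length = (grid.headD []).length := by
  rw [show (0:Int) = ((0:Nat):Int) by norm_num, PySem.List.pyGet?_natCast]
  cases grid with
  | nil => simp at h
  | cons a t => simp

theorem pvRow_len (grid : List (List Bool)) (i : Nat) (hi : i < grid.length)
    (hpre : ∀ row ∈ grid, (grid.headD []).length ≤ row.length) :
    (pvRow grid i).length = (grid.headD []).length := by
  rw [pvRow, List.length_take]
  exact Nat.min_eq_left (hpre _ (pvGetD_mem grid i hi))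

-- A's row pass, one row
theorem pvInnerA_row (grid : List (List Bool)) (i : Nat) (hi : i < grid.length)
    (hpre : ∀ row ∈ grid, (grid.headD []).length ≤ row.length) (count : Int) :
    ((PySem.List.pyRange ((0:Nat):Int) (((grid.headD []).length : Int) + 1) 1).foldl
        (fun (s : Int × Int) c =>
          if c < ((grid.headD []).length : Int) ∧ pvCell grid (i : Int) c then (s.1 + 1, s.2)
          else (0, if s.1 == 2 then s.2 + 1 else s.2)) (0, count))
      = (0, count + pvCntA 0 (pvRow grid i)) := by
  apply pvFoldA (fun c => pvCell grid (i : Int) c) (pvRow grid i) 0 (grid.headD []).length 0 count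
  · rw [pvRow_len grid i hi hpre]; omega
  · intro j hj
    rw [pvRow_len grid i hi hpre] at hj
    simp only [Nat.cast_zero, zero_add]
    exact pvCell_row grid i j hj

-- A's column pass, one column
theorem pvInnerA_col (grid : List (List Bool)) (j : Nat) (count : Int) :
    ((PySem.List.pyRange ((0:Nat):Int) ((grid.length : Int) + 1) 1).foldl
        (fun (s : Int × Int) r =>
          if r < (grid.length : Int) ∧ pvCell grid r (j : Int) then (s.1 + 1, s.2)
          else (0, if s.1 == 2 then s.2 + 1 else s.2)) (0, count))
      = (0, count + pvCntA 0 (pvCol grid j)) := by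
  apply pvFoldA (fun r => pvCell grid r (j : Int)) (pvCol grid j) 0 grid.length 0 count
  · simp [pvCol]
  · intro i hi
    simp only [pvCol, List.length_map] at hi
    simp only [Nat.cast_zero, zero_add]
    exact pvCell_col grid i j hi

-- B's horizontal indicator sum along one row
theorem pvInnerB_row (grid : List (List Bool)) (i : Nat) (hi : i < grid.length)
    (hpre : ∀ row ∈ grid, (grid.headD []).length ≤ row.length) :
    ((PySem.List.pyRange ((0:Nat):Int) ((grid.headD []).length : Int) 1).map (fun c =>
        if pvCell grid (i : Int) c ∧ c + 1 < ((grid.headD []).length : Int) ∧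
            pvCell grid (i : Int) (c + 1) ∧ (c = 0 ∨ ¬ pvCell grid (i : Int) (c - 1)) ∧
            (((grid.headD []).length : Int) ≤ c + 2 ∨ ¬ pvCell grid (i : Int) (c + 2))
        then (1 : Int) else 0)).sum = pvCntB false (pvRow grid i) := by
  apply pvFoldB (fun c => pvCell grid (i : Int) c) (pvRow grid i) 0 (grid.headD []).length false
  · rw [pvRow_len grid i hi hpre]; omega
  · intro j hj
    rw [pvRow_len grid i hi hpre] at hj
    simp only [Nat.cast_zero, zero_add]
    exact pvCell_row grid i j hj
  · simp

-- B's vertical indicator sum along one column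
theorem pvInnerB_col (grid : List (List Bool)) (j : Nat) :
    ((PySem.List.pyRange ((0:Nat):Int) (grid.length : Int) 1).map (fun r =>
        if pvCell grid r (j : Int) ∧ r + 1 < (grid.length : Int) ∧
            pvCell grid (r + 1) (j : Int) ∧ (r = 0 ∨ ¬ pvCell grid (r - 1) (j : Int)) ∧
            ((grid.length : Int) ≤ r + 2 ∨ ¬ pvCell grid (r + 2) (j : Int))
        then (1 : Int) else 0)).sum = pvCntB false (pvCol grid j) := by
  apply pvFoldB (fun r => pvCell grid r (j : Int)) (pvCol grid j) 0 grid.length false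
  · simp [pvCol]
  · intro i hi
    simp only [pvCol, List.length_map] at hi
    simp only [Nat.cast_zero, zero_add]
    exact pvCell_col grid i j hi
  · simp

-- members of pyRange 0 ↑m are casts of Nats below m
theorem pvMemRange (m : Nat) (x : Int) (hx : x ∈ PySem.List.pyRange 0 (m:Int)) :
    0 ≤ x ∧ x.toNat < m ∧ x = ((x.toNat : Nat) : Int) := by
  rw [PySem.List.mem_pyRange_one] at hx
  refine ⟨hx.1, by omega, by omega⟩

-- B's port as a double indicator sum
theorem pvB_sum (grid : List (List Bool)) (hne : grid ≠ []) :
    count_two_letter_slots_py_alt grid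
      = ((PySem.List.pyRange 0 (grid.length:Int) 1).map (fun r =>
          ((PySem.List.pyRange 0 ((grid.headD []).length:Int) 1).map (fun c =>
            (if pvCell grid r c ∧ c + 1 < ((grid.headD []).length:Int) ∧ pvCell grid r (c + 1) ∧
                (c = 0 ∨ ¬ pvCell grid r (c - 1)) ∧
                (((grid.headD []).length:Int) ≤ c + 2 ∨ ¬ pvCell grid r (c + 2))
              then (1:Int) else 0) +
            (if pvCell grid r c ∧ r + 1 < (grid.length:Int) ∧ pvCell grid (r + 1) c ∧
                (r = 0 ∨ ¬ pvCell grid (r - 1) c) ∧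
                ((grid.length:Int) ≤ r + 2 ∨ ¬ pvCell grid (r + 2) c)
              then (1:Int) else 0))).sum)).sum := by
  unfold count_two_letter_slots_py_alt
  simp only [pvCols_eq grid hne]
  set m := grid.length with hm
  set n0 := (grid.headD []).length with hn0
  rw [PySem.List.foldl_congr_mem _ _ (fun total r => total +
    ((PySem.List.pyRange 0 (n0:Int) 1).map (fun c =>
      (if pvCell grid r c ∧ c + 1 < (n0:Int) ∧ pvCell grid r (c + 1) ∧
          (c = 0 ∨ ¬ pvCell grid r (c - 1)) ∧ ((n0:Int) ≤ c + 2 ∨ ¬ pvCell grid r (c + 2))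
        then (1:Int) else 0) +
      (if pvCell grid r c ∧ r + 1 < (m:Int) ∧ pvCell grid (r + 1) c ∧
          (r = 0 ∨ ¬ pvCell grid (r - 1) c) ∧ ((m:Int) ≤ r + 2 ∨ ¬ pvCell grid (r + 2) c)
        then (1:Int) else 0))).sum) _ ?_]
  · rw [PySem.List.foldl_add]
    norm_num
  · intro total r _
    rw [PySem.List.foldl_congr_mem _ _ (fun total c => total +
      ((if pvCell grid r c ∧ c + 1 < (n0:Int) ∧ pvCell grid r (c + 1) ∧
          (c = 0 ∨ ¬ pvCell grid r (c - 1)) ∧ ((n0:Int) ≤ c + 2 ∨ ¬ pvCell grid r (c + 2))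
        then (1:Int) else 0) +
      (if pvCell grid r c ∧ r + 1 < (m:Int) ∧ pvCell grid (r + 1) c ∧
          (r = 0 ∨ ¬ pvCell grid (r - 1) c) ∧ ((m:Int) ≤ r + 2 ∨ ¬ pvCell grid (r + 2) c)
        then (1:Int) else 0))) _ ?_]
    · exact PySem.List.foldl_add _ _ _
    · intro total c _
      exact pvTwoIf _ _ total

-- ===== VERDICT (by name: the statement is the Claim_ definition above) =====
theorem count_two_letter_slots_py_spec : Claim_equal_count_two_letter_slots_py := by
  intro grid _ hpre
  obtain ⟨hne, hrows⟩ := hpre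
  unfold Spec_count_two_letter_slots_py
  rw [pvB_sum grid hne]
  unfold count_two_letter_slots_py
  simp only [pvCols_eq grid hne]
  set m := grid.length with hm
  set n0 := (grid.headD []).length with hn0
  -- A side: both passes become sums of per-line exact-run counts
  have hA1 : (PySem.List.pyRange 0 (m:Int) 1).foldl (fun count r =>
      ((PySem.List.pyRange 0 ((n0:Int) + 1) 1).foldl (fun (s : Int × Int) c =>
        if c < (n0:Int) ∧ pvCell grid r c then (s.1 + 1, s.2)
        else (0, if s.1 == 2 then s.2 + 1 else s.2)) (0, count)).2) 0
      = 0 + ((PySem.List.pyRange 0 (m:Int) 1).map (fun r => pvCntA 0 (pvRow grid r.toNat))).sum := by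
    rw [PySem.List.foldl_congr_mem _ _
      (fun count r => count + pvCntA 0 (pvRow grid r.toNat)) _ ?_]
    · exact PySem.List.foldl_add _ _ _
    · intro count r hr
      obtain ⟨_, hlt, hcast⟩ := pvMemRange m r hr
      rw [hcast]
      rw [show (PySem.List.pyRange 0 ((n0:Int) + 1) 1) =
        (PySem.List.pyRange (((0:Nat)):Int) ((n0:Int) + 1) 1) by norm_num]
      rw [pvInnerA_row grid r.toNat hlt hrows count]
      rfl
  have hA2 : ∀ init : Int, (PySem.List.pyRange 0 (n0:Int) 1).foldl (fun count c =>
      ((PySem.List.pyRange 0 ((m:Int) + 1) 1).foldl (fun (s : Int × Int) r =>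
        if r < (m:Int) ∧ pvCell grid r c then (s.1 + 1, s.2)
        else (0, if s.1 == 2 then s.2 + 1 else s.2)) (0, count)).2) init
      = init + ((PySem.List.pyRange 0 (n0:Int) 1).map (fun c => pvCntA 0 (pvCol grid c.toNat))).sum := by
    intro init
    rw [PySem.List.foldl_congr_mem _ _
      (fun count c => count + pvCntA 0 (pvCol grid c.toNat)) _ ?_]
    · exact PySem.List.foldl_add _ _ _
    · intro count c hc
      obtain ⟨_, hlt, hcast⟩ := pvMemRange n0 c hc
      rw [hcast]
      rw [show (PySem.List.pyRange 0 ((m:Int) + 1) 1) =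
        (PySem.List.pyRange (((0:Nat)):Int) ((m:Int) + 1) 1) by norm_num]
      rw [pvInnerA_col grid c.toNat count]
      rfl
  rw [hA1, hA2]
  -- B side: split the double sum into horizontal and vertical indicator sums
  rw [show (fun (r : Int) => ((PySem.List.pyRange 0 (n0:Int) 1).map (fun c =>
        (if pvCell grid r c ∧ c + 1 < (n0:Int) ∧ pvCell grid r (c + 1) ∧
            (c = 0 ∨ ¬ pvCell grid r (c - 1)) ∧ ((n0:Int) ≤ c + 2 ∨ ¬ pvCell grid r (c + 2))
          then (1:Int) else 0) +
        (if pvCell grid r c ∧ r + 1 < (m:Int) ∧ pvCell grid (r + 1) c ∧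
            (r = 0 ∨ ¬ pvCell grid (r - 1) c) ∧ ((m:Int) ≤ r + 2 ∨ ¬ pvCell grid (r + 2) c)
          then (1:Int) else 0))).sum)
      = (fun (r : Int) => ((PySem.List.pyRange 0 (n0:Int) 1).map (fun c =>
        if pvCell grid r c ∧ c + 1 < (n0:Int) ∧ pvCell grid r (c + 1) ∧
            (c = 0 ∨ ¬ pvCell grid r (c - 1)) ∧ ((n0:Int) ≤ c + 2 ∨ ¬ pvCell grid r (c + 2))
          then (1:Int) else 0)).sum + ((PySem.List.pyRange 0 (n0:Int) 1).map (fun c =>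
        if pvCell grid r c ∧ r + 1 < (m:Int) ∧ pvCell grid (r + 1) c ∧
            (r = 0 ∨ ¬ pvCell grid (r - 1) c) ∧ ((m:Int) ≤ r + 2 ∨ ¬ pvCell grid (r + 2) c)
          then (1:Int) else 0)).sum)
    from funext (fun r => PySem.List.sum_map_add_int _ _ _), PySem.List.sum_map_add_int]
  -- horizontal part
  have hH : ((PySem.List.pyRange 0 (m:Int) 1).map (fun r =>
      ((PySem.List.pyRange 0 (n0:Int) 1).map (fun c =>
        if pvCell grid r c ∧ c + 1 < (n0:Int) ∧ pvCell grid r (c + 1) ∧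
            (c = 0 ∨ ¬ pvCell grid r (c - 1)) ∧ ((n0:Int) ≤ c + 2 ∨ ¬ pvCell grid r (c + 2))
        then (1:Int) else 0)).sum)).sum
      = ((PySem.List.pyRange 0 (m:Int) 1).map (fun r => pvCntB false (pvRow grid r.toNat))).sum := by
    apply congrArg
    apply List.map_congr_left
    intro r hr
    obtain ⟨_, hlt, hcast⟩ := pvMemRange m r hr
    rw [hcast]
    rw [show (PySem.List.pyRange 0 (n0:Int) 1) =
      (PySem.List.pyRange (((0:Nat)):Int) (n0:Int) 1) by norm_num]
    exact pvInnerB_row grid r.toNat hlt hrows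
  -- vertical part: swap the two sums, then reduce each column
  have hV : ((PySem.List.pyRange 0 (m:Int) 1).map (fun r =>
      ((PySem.List.pyRange 0 (n0:Int) 1).map (fun c =>
        if pvCell grid r c ∧ r + 1 < (m:Int) ∧ pvCell grid (r + 1) c ∧
            (r = 0 ∨ ¬ pvCell grid (r - 1) c) ∧ ((m:Int) ≤ r + 2 ∨ ¬ pvCell grid (r + 2) c)
        then (1:Int) else 0)).sum)).sum
      = ((PySem.List.pyRange 0 (n0:Int) 1).map (fun c => pvCntB false (pvCol grid c.toNat))).sum := by
    rw [pvSumSwap]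
    apply congrArg
    apply List.map_congr_left
    intro c hc
    obtain ⟨_, hlt, hcast⟩ := pvMemRange n0 c hc
    rw [hcast]
    rw [show (PySem.List.pyRange 0 (m:Int) 1) =
      (PySem.List.pyRange (((0:Nat)):Int) (m:Int) 1) by norm_num]
    exact pvInnerB_col grid c.toNat
  rw [hH, hV]
  rw [List.map_congr_left (fun (r : Int) _ => (pvCntA_eq_cntB (pvRow grid r.toNat)).symm),
    List.map_congr_left (fun (c : Int) _ => (pvCntA_eq_cntB (pvCol grid c.toNat)).symm)]
  ring
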